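-- pv_equiv track=rewrite | github.com/cliaz/crap-stock-monitoring | v2/trading_simulator.py | red_black_logic
-- ===== SOURCE A (Python) =====
-- def red_black_logic(values):
--     result = ['n/a']  # First row has no previous, default to n/a
--     for i in range(1, len(values)):
--         if values[i] > values[i-1]:
--             result.append('Black')
--         elif values[i] < values[i-1]:
--             result.append('Red')
--         else:
--             # If NYSI is the same, maintain previous Red/Black value
--             result.append(result[i-1])
--     return result
-- ===== SOURCE B (Python) =====
-- def red_black_logic(values):
--     # Run-length encode consecutive equal values, then expand each run to a
--     # block of identical labels: the first run is all 'n/a', every later run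
--     # is all 'Black'/'Red' by comparing its value with the previous run's.
--     runs = []
--     for v in values:
--         if runs and runs[-1][0] == v:
--             runs[-1] = (v, runs[-1][1] + 1)
--         else:
--             runs.append((v, 1))
--     out = []
--     prev = None
--     for v, n in runs:
--         if prev is None:
--             out += ['n/a'] * n
--         else:
--             out += (['Black'] if v > prev else ['Red']) * n
--         prev = v
--     return out
-- ===== Notes on version B (the rewrite author's own statement) =====
-- stated objective: alternative
-- what changed: Replaces the index loop that carries the previous label element by element (reading back into its own result list) with a run-length encoding of consecutive equal values followed by an expansion of each run into a block of identical labels, so ties never involve a carried per-element label.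
-- intended difference: On the empty list A returns ['n/a'] (a leftover of its result initialization: one label with zero input values), while B returns [], the intended one-label-per-value result. — e.g. on red_black_logic([]): A returns ["n/a"], B returns []
import Mathlib
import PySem

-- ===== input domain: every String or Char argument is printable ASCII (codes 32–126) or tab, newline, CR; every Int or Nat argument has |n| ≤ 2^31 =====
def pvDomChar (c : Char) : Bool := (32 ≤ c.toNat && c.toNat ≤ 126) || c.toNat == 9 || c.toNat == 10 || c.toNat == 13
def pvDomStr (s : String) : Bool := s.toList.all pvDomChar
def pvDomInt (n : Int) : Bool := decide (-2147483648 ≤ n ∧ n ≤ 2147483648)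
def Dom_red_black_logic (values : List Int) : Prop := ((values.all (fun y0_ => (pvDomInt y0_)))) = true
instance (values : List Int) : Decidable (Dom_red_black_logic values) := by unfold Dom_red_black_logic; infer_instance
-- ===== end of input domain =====

-- B replaces A's index loop (which carries the previous label by reading back into its
-- own result list) with a run-length encoding of equal runs expanded into label blocks;
-- same O(n) cost. On the empty list A returns ['n/a'] and B returns [] (see D_ below).


-- ===== PORT A =====
def red_black_logic (values : List Int) : List String :=
  (PySem.List.pyRange 1 values.length 1).foldl
    (fun result i =>
      if PySem.List.pyGetD values i 0 > PySem.List.pyGetD values (i - 1) 0 then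
        result ++ ["Black"]
      else if PySem.List.pyGetD values i 0 < PySem.List.pyGetD values (i - 1) 0 then
        result ++ ["Red"]
      else
        result ++ [PySem.List.pyGetD result (i - 1) ""])
    ["n/a"]

-- ===== PORT B =====
-- Pass 1 of Source B: run-length encode (runs[-1] update = replace the last element).
def rbAddRun (runs : List (Int × Int)) (v : Int) : List (Int × Int) :=
  match runs.getLast? with
  | some (w, n) => if w = v then runs.dropLast ++ [(w, n + 1)] else runs ++ [(v, 1)]
  | none => [(v, 1)]

def red_black_logic_alt (values : List Int) : List String :=
  let runs := values.foldl rbAddRun []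
  (runs.foldl
    (fun (st : List String × Option Int) r =>
      (st.1 ++ (match st.2 with
        | none => List.replicate r.2.toNat "n/a"
        | some prev => List.replicate r.2.toNat (if r.1 > prev then "Black" else "Red")),
       some r.1))
    ([], none)).1

-- ===== PRECONDITION & SPEC =====
-- On the empty list A returns ['n/a'] (a leftover of its result initialization: one
-- label with zero input values) while B returns [], the intended one-label-per-value result.
def D_red_black_logic (values : List Int) : Prop := values = []
instance (values : List Int) : Decidable (D_red_black_logic values) := by unfold D_red_black_logic; infer_instance
def Spec_red_black_logic (values : List Int) (out : List String) : Prop := ¬ D_red_black_logic values → out = red_black_logic_alt values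
instance (values : List Int) (out : List String) : Decidable (Spec_red_black_logic values out) := by unfold Spec_red_black_logic; infer_instance
def pvDiffWitness_red_black_logic : List Int := ([])
def pvDiffWitnessOut_red_black_logic : (List String) × (List String) := (["n/a"], [])

-- ===== CLAIM (what is proved, stated in full; the proofs are below) =====
def Claim_unchanged_red_black_logic : Prop := ∀ (values : List Int), Dom_red_black_logic values → Spec_red_black_logic values (red_black_logic values)
def Claim_changed_red_black_logic : Prop := Dom_red_black_logic (pvDiffWitness_red_black_logic) ∧ D_red_black_logic (pvDiffWitness_red_black_logic) ∧ red_black_logic (pvDiffWitness_red_black_logic) = pvDiffWitnessOut_red_black_logic.1 ∧ red_black_logic_alt (pvDiffWitness_red_black_logic) = pvDiffWitnessOut_red_black_logic.2 ∧ pvDiffWitnessOut_red_black_logic.1 ≠ pvDiffWitnessOut_red_black_logic.2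
def Claim_exact_red_black_logic : Prop := ∀ (values : List Int), Dom_red_black_logic values → D_red_black_logic values → red_black_logic values ≠ red_black_logic_alt values

-- ===== LEMMAS AND PROOFS =====

-- Reference: labels of the adjacent-pair list with a carried fill label.
def rbFill (last : String) : List (Int × Int) → List String
  | [] => []
  | (a, b) :: rest =>
      if b > a then "Black" :: rbFill "Black" rest
      else if b < a then "Red" :: rbFill "Red" rest
      else last :: rbFill last rest

-- ---- A side: A = "n/a" :: rbFill over adjacent pairs ----

lemma zip_tail_drop (vs : List Int) (k : Nat) (hk : k + 1 < vs.length) :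
    (vs.drop k).zip (vs.drop k).tail
      = (vs[k], vs[k + 1]) :: (vs.drop (k + 1)).zip (vs.drop (k + 1)).tail := by
  have h1 : vs.drop k = vs[k] :: vs.drop (k + 1) := List.drop_eq_getElem_cons (by omega)
  have h2 : vs.drop (k + 1) = vs[k + 1] :: vs.drop (k + 2) := List.drop_eq_getElem_cons hk
  rw [h1, h2]
  simp only [List.tail_cons, List.zip_cons_cons]

lemma foldlA_eq_fill (vs : List Int) (k : Nat) (acc : List String)
    (hlen : acc.length = k + 1) :
    ((PySem.List.pyRange ((k : Int) + 1) vs.length 1).foldl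
      (fun result i =>
        if PySem.List.pyGetD vs i 0 > PySem.List.pyGetD vs (i - 1) 0 then
          result ++ ["Black"]
        else if PySem.List.pyGetD vs i 0 < PySem.List.pyGetD vs (i - 1) 0 then
          result ++ ["Red"]
        else
          result ++ [PySem.List.pyGetD result (i - 1) ""]) acc)
      = acc ++ rbFill (acc.getLastD "n/a") ((vs.drop k).zip (vs.drop k).tail) := by
  induction hm : vs.length - (k + 1) generalizing k acc with
  | zero =>
      rw [PySem.List.pyRange_one]
      have hz : (((vs.length : Int)) - ((k : Int) + 1)).toNat = 0 := by omega
      rw [hz]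
      simp only [List.range_zero, List.map_nil, List.foldl_nil]
      rcases Nat.lt_or_ge k vs.length with hk | hk
      · have : vs.drop k = [vs[k]] := by
          rw [List.drop_eq_getElem_cons hk]
          have : vs.drop (k + 1) = [] := by
            apply List.drop_eq_nil_of_le; omega
          rw [this]
        rw [this]; simp [List.zip, rbFill]
      · have : vs.drop k = [] := List.drop_eq_nil_of_le (by omega)
        rw [this]; simp [List.zip, rbFill]
  | succ m ih =>
      have hk1 : k + 1 < vs.length := by omega
      have hlt : ((k : Int) + 1) < (vs.length : Int) := by exact_mod_cast hk1
      rw [PySem.List.pyRange_one_cons hlt]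
      simp only [List.foldl_cons]
      have hg1 : PySem.List.pyGetD vs ((k : Int) + 1) 0 = vs[k + 1] := by
        have : ((k : Int) + 1) = ((k + 1 : Nat) : Int) := by omega
        rw [this, PySem.List.pyGetD_natCast]
        simp [List.getD, hk1]
      have hg0 : PySem.List.pyGetD vs ((k : Int) + 1 - 1) 0 = vs[k] := by
        have : ((k : Int) + 1 - 1) = ((k : Nat) : Int) := by omega
        rw [this, PySem.List.pyGetD_natCast]
        simp [List.getD, Nat.lt_of_succ_lt hk1]
      have hgr : PySem.List.pyGetD acc ((k : Int) + 1 - 1) "" = acc.getLastD "n/a" := by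
        have : ((k : Int) + 1 - 1) = ((k : Nat) : Int) := by omega
        rw [this, PySem.List.pyGetD_natCast]
        rw [List.getLastD_eq_getLast?, List.getLast?_eq_getElem?]
        simp [List.getD, hlen]
      rw [hg1, hg0, hgr]
      rw [zip_tail_drop vs k hk1]
      have harith : (k : Int) + 1 + 1 = ((k + 1 : Nat) : Int) + 1 := by omega
      by_cases h1 : vs[k + 1] > vs[k]
      · simp only [h1, if_pos]
        rw [harith, ih (k + 1) _ (by simp [hlen]) (by omega)]
        simp [rbFill, h1]
      · by_cases h2 : vs[k + 1] < vs[k]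
        · simp only [h1, if_pos h2, ite_false]
          rw [harith, ih (k + 1) _ (by simp [hlen]) (by omega)]
          simp [rbFill, h1, h2]
        · simp only [h1, h2, ite_false]
          rw [harith, ih (k + 1) _ (by simp [hlen]) (by omega)]
          simp [rbFill, h1, h2]

-- ---- B side ----

-- B's second pass as a recursive function.
def rbExpand (prev : Option Int) : List (Int × Int) → List String
  | [] => []
  | (v, n) :: rs =>
      (match prev with
        | none => List.replicate n.toNat "n/a"
        | some p => List.replicate n.toNat (if v > p then "Black" else "Red"))
      ++ rbExpand (some v) rs

lemma foldlB_eq_expand (runs : List (Int × Int)) (acc : List String) (prev : Option Int) :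
    (runs.foldl
      (fun (st : List String × Option Int) r =>
        (st.1 ++ (match st.2 with
          | none => List.replicate r.2.toNat "n/a"
          | some p => List.replicate r.2.toNat (if r.1 > p then "Black" else "Red")),
         some r.1))
      (acc, prev)).1 = acc ++ rbExpand prev runs := by
  induction runs generalizing acc prev with
  | nil => simp [rbExpand]
  | cons r rs ih =>
      obtain ⟨v, n⟩ := r
      simp only [List.foldl_cons, rbExpand, ih, List.append_assoc]

lemma rbExpand_append (prev : Option Int) (rs rs' : List (Int × Int)) :
    rbExpand prev (rs ++ rs')
      = rbExpand prev rs ++ rbExpand (rs.getLast?.map Prod.fst |>.or prev) rs' := by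
  induction rs generalizing prev with
  | nil => simp [rbExpand]
  | cons r t ih =>
      obtain ⟨v, n⟩ := r
      simp only [List.cons_append, rbExpand, ih (some v), List.append_assoc]
      cases t with
      | nil => simp
      | cons a u =>
          cases hx : (a :: u).getLast? with
          | none => simp [List.getLast?_eq_none_iff] at hx
          | some x => simp [hx]

-- fill state after processing a pair list
def rbState (last : String) : List (Int × Int) → String
  | [] => last
  | (a, b) :: rest =>
      if b > a then rbState "Black" rest
      else if b < a then rbState "Red" rest
      else rbState last rest

lemma rbFill_getLastD (last : String) (ps : List (Int × Int)) :
    (rbFill last ps).getLastD last = rbState last ps := by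
  induction ps generalizing last with
  | nil => rfl
  | cons p rest ih =>
      obtain ⟨a, b⟩ := p
      simp only [rbFill, rbState]
      by_cases h1 : b > a
      · rw [if_pos h1, if_pos h1, List.getLastD_cons, ih]
      · by_cases h2 : b < a
        · rw [if_neg h1, if_neg h1, if_pos h2, if_pos h2, List.getLastD_cons, ih]
        · rw [if_neg h1, if_neg h1, if_neg h2, if_neg h2, List.getLastD_cons, ih]

lemma rbFill_append_single (last : String) (ps : List (Int × Int)) (a b : Int) :
    rbFill last (ps ++ [(a, b)])
      = rbFill last ps
        ++ [if b > a then "Black" else if b < a then "Red" else rbState last ps] := by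
  induction ps generalizing last with
  | nil =>
      simp only [List.nil_append, rbFill, rbState]
      split_ifs <;> rfl
  | cons p rest ih =>
      obtain ⟨c, d⟩ := p
      by_cases h1 : d > c
      · simp [rbFill, rbState, h1, ih]
      · by_cases h2 : d < c <;> simp [rbFill, rbState, h1, h2, ih]

lemma pairs_append_single (ys : List Int) (v : Int) (h : ys ≠ []) :
    (ys ++ [v]).zip (ys ++ [v]).tail
      = ys.zip ys.tail ++ [(ys.getLast h, v)] := by
  induction ys with
  | nil => exact absurd rfl h
  | cons y t ih =>
      cases t with
      | nil => simp [List.zip]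
      | cons z t' =>
          have := ih (by simp)
          simp only [List.cons_append, List.tail_cons, List.zip_cons_cons] at this ⊢
          rw [List.getLast_cons (by simp)]
          simp [this]

-- One extra equal value appends one more copy of the last emitted label.
lemma expand_step (dp target : List String) (Lc : String) (k : Int) (hk : 1 ≤ k)
    (ihE : dp ++ List.replicate k.toNat Lc = "n/a" :: target) :
    dp ++ List.replicate (k + 1).toNat Lc
      = "n/a" :: (target ++ [("n/a" :: target).getLastD "x"]) := by
  have hkpos : k.toNat ≠ 0 := by omega
  have hrep : (k + 1).toNat = k.toNat + 1 := by omega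
  have h1 := congrArg List.getLast? ihE
  rw [List.getLast?_append, List.getLast?_replicate, if_neg hkpos, Option.some_or] at h1
  have h2 : ("n/a" :: target).getLastD "x" = Lc := by
    rw [List.getLastD_eq_getLast?, ← h1]
    rfl
  rw [hrep, List.replicate_succ', ← List.append_assoc, ihE, h2]
  simp

-- Main invariant: for nonempty vs, expanding the run-length encoding gives
-- "n/a" :: rbFill over the adjacent pairs, and the last run is (vs.getLast, k) with k ≥ 1.
lemma runs_spec (vs : List Int) (h : vs ≠ []) :
    rbExpand none (vs.foldl rbAddRun []) = "n/a" :: rbFill "n/a" (vs.zip vs.tail)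
    ∧ ∃ k : Int, 1 ≤ k ∧ (vs.foldl rbAddRun []).getLast? = some (vs.getLast h, k) := by
  induction vs using List.reverseRecOn with
  | nil => exact absurd rfl h
  | append_singleton ys v ih =>
      rw [List.foldl_append, List.foldl_cons, List.foldl_nil]
      by_cases hys : ys = []
      · subst hys
        refine ⟨?_, 1, le_refl 1, ?_⟩ <;> simp [rbAddRun, rbExpand, rbFill, List.zip]
      · obtain ⟨ihE, k, hk1, hlast⟩ := ih hys
        set R := ys.foldl rbAddRun [] with hR
        have hRne : R ≠ [] := by
          intro hnil; rw [hnil] at hlast; simp at hlast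
        have hglast : (ys ++ [v]).getLast (by simp) = v := by simp
        have hsplit : R.dropLast ++ [(ys.getLast hys, k)] = R := by
          have := List.dropLast_append_getLast hRne
          rwa [List.getLast_eq_iff_getLast?_eq_some hRne |>.mpr hlast] at this
        rw [rbAddRun, hlast]
        dsimp only
        rw [pairs_append_single ys v hys, rbFill_append_single]
        have hstate : ("n/a" :: rbFill "n/a" (ys.zip ys.tail)).getLastD "x"
            = rbState "n/a" (ys.zip ys.tail) := by
          rw [List.getLastD_cons, rbFill_getLastD]
        by_cases heq : ys.getLast hys = v
        · -- equal: extend the last run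
          rw [if_pos heq]
          rw [heq] at hsplit
          rw [heq]
          constructor
          · rw [← hsplit] at ihE
            rw [rbExpand_append] at ihE ⊢
            cases hdl : ((R.dropLast.getLast?.map Prod.fst).or none) with
            | none =>
                rw [hdl] at ihE
                simp only [rbExpand, List.append_nil] at ihE ⊢
                rw [if_neg (lt_irrefl v), if_neg (lt_irrefl v), ← hstate]
                exact expand_step _ _ _ k hk1 ihE
            | some w =>
                rw [hdl] at ihE
                simp only [rbExpand, List.append_nil] at ihE ⊢
                rw [if_neg (lt_irrefl v), if_neg (lt_irrefl v), ← hstate]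
                exact expand_step _ _ _ k hk1 ihE
          · exact ⟨k + 1, by omega, by simp [hglast]⟩
        · -- strict: start a new run
          rw [if_neg heq]
          constructor
          · rw [rbExpand_append, ihE]
            have hor : ((R.getLast?.map Prod.fst).or none) = some (ys.getLast hys) := by
              rw [hlast]; rfl
            rw [hor]
            simp only [rbExpand, List.append_nil, Int.toNat_one, List.replicate_one]
            rcases lt_trichotomy (ys.getLast hys) v with hlt | heq' | hgt
            · simp [hlt]
            · exact absurd heq' heq
            · simp [hgt, not_lt.mpr (le_of_lt hgt)]
          · exact ⟨1, le_refl 1, by simp [hglast]⟩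

-- ===== VERDICT (by name: the statement is the Claim_ definition above) =====
theorem red_black_logic_spec : Claim_unchanged_red_black_logic := by
  intro vs _ hD
  have hne : vs ≠ [] := hD
  unfold red_black_logic red_black_logic_alt
  rw [foldlB_eq_expand, (runs_spec vs hne).1]
  simpa using foldlA_eq_fill vs 0 ["n/a"] rfl

theorem red_black_logic_changed : Claim_changed_red_black_logic := by
  unfold Claim_changed_red_black_logic; decide

theorem red_black_logic_tight : Claim_exact_red_black_logic := by
  intro vs _ hD
  unfold D_red_black_logic at hD
  subst hD; decide
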